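-- pv_equiv track=rewrite | github.com/dawid-bytys/university | term-5/python/labs-4/4.2.py | make_ruler
-- ===== SOURCE A (Python) =====
-- def make_ruler(length: int) -> str:
--     ruler = "|"
--     numbers = "0"
--
--     for i in range(1, length + 1):
--         ruler += "....|"
--         i_len = len(str(i))
--         numbers += " " * (5 - i_len) + str(i)
--
--     ruler += "\n" + numbers
--
--     return ruler
-- ===== SOURCE B (Python) =====
-- def make_ruler(length: int) -> str:
--     def seg(lo: int, hi: int) -> tuple:
--         # (ruler part, numbers part) for marks lo..hi, by divide and conquer
--         if lo > hi:
--             return ("", "")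
--         if lo == hi:
--             s = str(lo)
--             return ("....|", " " * (5 - len(s)) + s)
--         mid = (lo + hi) // 2
--         r1, n1 = seg(lo, mid)
--         r2, n2 = seg(mid + 1, hi)
--         return (r1 + r2, n1 + n2)
--
--     r, n = seg(1, length)
--     return "|" + r + "\n" + "0" + n
-- ===== Notes on version B (the rewrite author's own statement) =====
-- stated objective: alternative
-- what changed: Replaces the single fused forward loop with two string accumulators by a divide-and-conquer recursion that splits the mark range [1..length] at its midpoint, builds each half's ruler/numbers pieces independently, and concatenates them (O(log n) recursion depth, balanced concatenations).
import Mathlib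
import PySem

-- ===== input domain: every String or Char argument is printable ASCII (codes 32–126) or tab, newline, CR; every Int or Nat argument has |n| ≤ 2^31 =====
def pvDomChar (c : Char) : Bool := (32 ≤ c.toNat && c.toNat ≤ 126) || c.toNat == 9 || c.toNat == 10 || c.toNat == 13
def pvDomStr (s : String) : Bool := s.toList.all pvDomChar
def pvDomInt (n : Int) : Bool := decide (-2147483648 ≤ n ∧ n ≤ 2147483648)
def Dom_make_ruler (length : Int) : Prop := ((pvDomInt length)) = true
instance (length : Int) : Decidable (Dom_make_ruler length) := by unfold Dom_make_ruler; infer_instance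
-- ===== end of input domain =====

-- B replaces A's single fused forward loop by a divide-and-conquer recursion
-- splitting the mark range at its midpoint (alternative decomposition, same result).

-- ===== PORT A =====
-- the loop body: ruler += "....|"; numbers += " " * (5 - len(str(i))) + str(i)
-- " " * (5 - i_len) is ported by hand as a replicate (exact: empty when 5 - i_len ≤ 0)
def makeRulerStep (acc : String × String) (i : Int) : String × String :=
  (acc.1 ++ "....|",
   acc.2 ++ String.ofList (List.replicate ((5 - PySem.Str.len (PySem.Int.toStr i)).toNat) ' ')
         ++ PySem.Int.toStr i)

def make_ruler (length : Int) : String :=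
  let p := (PySem.List.pyRange 1 (length + 1) 1).foldl makeRulerStep ("|", "0")
  p.1 ++ "\n" ++ p.2

-- ===== PORT B =====
-- seg lo hi: (ruler part, numbers part) for marks lo..hi, by divide and conquer;
-- (lo + hi) // 2 is PySem.Int.floordiv; " " * (5 - len(s)) is a replicate (exact)
def makeRulerSeg (lo hi : Int) : String × String :=
  if lo > hi then ("", "")
  else if lo = hi then
    let s := PySem.Int.toStr lo
    ("....|", String.ofList (List.replicate ((5 - PySem.Str.len s).toNat) ' ') ++ s)
  else
    let mid := PySem.Int.floordiv (lo + hi) 2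
    let p1 := makeRulerSeg lo mid
    let p2 := makeRulerSeg (mid + 1) hi
    (p1.1 ++ p2.1, p1.2 ++ p2.2)
termination_by (hi - lo).toNat
decreasing_by
  · have h := PySem.Int.floordiv_two_mid_bounds (lo := lo) (hi := hi) (by omega)
    have h2 : 2 * PySem.Int.floordiv (lo + hi) 2 ≤ lo + hi := by
      have := PySem.Int.floordiv_mul_add_mod (lo + hi) 2
      have hm : 0 ≤ PySem.Int.mod (lo + hi) 2 := by
        have := PySem.Int.mod_eq_emod_of_pos (a := lo + hi) (b := 2) (by omega)
        omega
      omega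
    omega
  · have h := PySem.Int.floordiv_two_mid_bounds (lo := lo) (hi := hi) (by omega)
    omega

def make_ruler_alt (length : Int) : String :=
  let p := makeRulerSeg 1 length
  "|" ++ p.1 ++ "\n" ++ "0" ++ p.2

-- ===== PRECONDITION & SPEC =====
def Spec_make_ruler (length : Int) (out : String) : Prop := out = make_ruler_alt length
instance (length : Int) (out : String) : Decidable (Spec_make_ruler length out) := by unfold Spec_make_ruler; infer_instance

-- ===== CLAIM (what is proved, stated in full; the proofs are below) =====
def Claim_equal_make_ruler : Prop := ∀ (length : Int), Dom_make_ruler length → Spec_make_ruler length (make_ruler length)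

-- ===== LEMMAS AND PROOFS =====

-- the padded digits of i, on the character level
def padChars (i : Int) : List Char :=
  List.replicate (5 - (PySem.Int.toChars i).length) ' ' ++ PySem.Int.toChars i

theorem foldA (l : List Int) (r0 n0 : String) :
    (l.foldl makeRulerStep (r0, n0)).1.toList
        = r0.toList ++ (List.replicate l.length "....|".toList).flatten
  ∧ (l.foldl makeRulerStep (r0, n0)).2.toList
        = n0.toList ++ (l.map padChars).flatten := by
  induction l generalizing r0 n0 with
  | nil => simp
  | cons i l ih =>
    have h := ih (r0 ++ "....|")
      (n0 ++ String.ofList (List.replicate ((5 - PySem.Str.len (PySem.Int.toStr i)).toNat) ' ')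
          ++ PySem.Int.toStr i)
    simp [List.foldl_cons, makeRulerStep] at h ⊢
    rw [h.1, h.2]
    constructor
    · simp [List.replicate_succ]
    · simp [padChars, PySem.Int.toChars, List.append_assoc]

theorem segB (n : Nat) : ∀ lo hi : Int, (hi - lo).toNat = n → lo ≤ hi →
    (makeRulerSeg lo hi).1.toList
        = (List.replicate (hi - lo + 1).toNat "....|".toList).flatten
  ∧ (makeRulerSeg lo hi).2.toList
        = ((PySem.List.pyRange lo (hi + 1) 1).map padChars).flatten := by
  induction n using Nat.strong_induction_on with
  | _ n ih =>
    intro lo hi hn hle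
    rcases eq_or_lt_of_le hle with heq | hlt
    · subst heq
      rw [makeRulerSeg]
      simp [PySem.List.pyRange_one_singleton, padChars, PySem.Int.toChars]
    · have hmid := PySem.Int.floordiv_two_mid_bounds (lo := lo) (hi := hi) hle
      set mid := PySem.Int.floordiv (lo + hi) 2 with hmiddef
      have hmidlt : mid < hi := by
        have h2 : 2 * mid ≤ lo + hi := by
          have := PySem.Int.floordiv_mul_add_mod (lo + hi) 2
          have hm : 0 ≤ PySem.Int.mod (lo + hi) 2 := by
            have := PySem.Int.mod_eq_emod_of_pos (a := lo + hi) (b := 2) (by omega)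
            omega
          omega
        omega
      have h1 := ih (mid - lo).toNat (by omega) lo mid rfl hmid.1
      have h2 := ih (hi - (mid + 1)).toNat (by omega) (mid + 1) hi rfl (by omega)
      rw [makeRulerSeg]
      simp only [show ¬ lo > hi by omega, if_false, show ¬ lo = hi by omega, if_false]
      rw [← hmiddef]
      constructor
      · simp only [String.toList_append, h1.1, h2.1, ← List.flatten_append,
          ← List.replicate_add]
        congr 2
        omega
      · simp only [String.toList_append, h1.2, h2.2, ← List.flatten_append, ← List.map_append]
        rw [← PySem.List.pyRange_one_append lo (mid + 1) (hi + 1) (by omega) (by omega)]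

-- ===== VERDICT (by name: the statement is the Claim_ definition above) =====
theorem make_ruler_spec : Claim_equal_make_ruler := by
  intro length _
  unfold Spec_make_ruler
  obtain ⟨h1, h2⟩ := foldA (PySem.List.pyRange 1 (length + 1) 1) "|" "0"
  apply String.ext
  by_cases hlen : 1 ≤ length
  · obtain ⟨b1, b2⟩ := segB (length - 1).toNat 1 length (by omega) hlen
    simp only [make_ruler, make_ruler_alt, String.toList_append, b1, b2, h1, h2,
      PySem.List.length_pyRange_one]
    rw [show (length + 1 - 1).toNat = (length - 1 + 1).toNat by omega]
    simp [List.append_assoc]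
  · have he : PySem.List.pyRange 1 (length + 1) 1 = [] :=
      PySem.List.pyRange_one_eq_nil (by omega)
    rw [make_ruler, make_ruler_alt, makeRulerSeg]
    simp [he, show (1 : Int) > length by omega]
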